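-- pv_equiv track=rewrite | github.com/JuliaEidelwein/Backpropagation | test_and_training.py | sum_tp_fp_fn
-- ===== SOURCE A (Python) =====
-- def sum_tp_fp_fn(confusion_matrix, target_class=None):
--     '''
--     Returns the sum of true positives, false positives and false negatives
--     target_class = class to have its sum returned: if None, sums all classes
--     '''
--     tp = 0
--     fp = 0
--     fn = 0
--     if target_class is not None:
--         tp = confusion_matrix[target_class][target_class]
--         for class_name in confusion_matrix:
--             if target_class != class_name:
--                 fp += confusion_matrix[class_name][target_class]
--                 fn += confusion_matrix[target_class][class_name]
--     else:
--         for c1 in confusion_matrix: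
--             for c2 in confusion_matrix:
--                 if c1 != c2:
--                     fp += confusion_matrix[c2][c1]
--                     fn += confusion_matrix[c1][c2]
--                 else:
--                     tp += confusion_matrix[c1][c2]
--     return tp, fp, fn
-- ===== SOURCE B (Python) =====
-- def sum_tp_fp_fn(confusion_matrix, target_class=None):
--     keys = list(confusion_matrix)
--     if target_class is not None:
--         tp = confusion_matrix[target_class][target_class]
--         fp = sum(confusion_matrix[k][target_class] for k in keys) - tp
--         fn = sum(confusion_matrix[target_class][k] for k in keys) - tp
--         return tp, fp, fn
--     total = sum(confusion_matrix[k1][k2] for k1 in keys for k2 in keys)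
--     diag = sum(confusion_matrix[k][k] for k in keys)
--     return diag, total - diag, total - diag
-- ===== Notes on version B (the rewrite author's own statement) =====
-- stated objective: simpler
-- what changed: B replaces A's per-element inequality branching by aggregate sums minus the diagonal: tp = cm[t][t], fp/fn = column/row sums minus tp (and for target_class=None, tp = trace and fp = fn = grand total minus trace).
import Mathlib
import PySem

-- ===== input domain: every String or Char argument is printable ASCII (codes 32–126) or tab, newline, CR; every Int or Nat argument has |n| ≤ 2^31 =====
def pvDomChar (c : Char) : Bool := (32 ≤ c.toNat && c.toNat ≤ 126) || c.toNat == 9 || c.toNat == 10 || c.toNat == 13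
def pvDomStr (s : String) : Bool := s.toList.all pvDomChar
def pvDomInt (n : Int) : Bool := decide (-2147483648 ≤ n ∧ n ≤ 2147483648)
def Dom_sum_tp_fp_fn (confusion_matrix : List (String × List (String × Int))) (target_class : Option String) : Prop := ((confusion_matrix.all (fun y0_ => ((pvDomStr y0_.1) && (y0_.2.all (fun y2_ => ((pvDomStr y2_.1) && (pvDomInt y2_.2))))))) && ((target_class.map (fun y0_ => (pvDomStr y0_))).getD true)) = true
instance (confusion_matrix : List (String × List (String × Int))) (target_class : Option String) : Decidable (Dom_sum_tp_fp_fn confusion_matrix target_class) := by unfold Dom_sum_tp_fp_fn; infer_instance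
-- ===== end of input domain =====

-- B replaces A's per-element branching by aggregate sums minus the diagonal (simpler decomposition, same cost).

-- shared accessor: confusion_matrix[k1][k2] as a total function (Pre_ guarantees the keys exist)
def pvRow (cm : List (String × List (String × Int))) (k : String) : List (String × Int) :=
  (cm.lookup k).getD []
def pvCell (cm : List (String × List (String × Int))) (k1 k2 : String) : Int :=
  ((pvRow cm k1).lookup k2).getD 0

-- ===== PORT A =====
def sum_tp_fp_fn (confusion_matrix : List (String × List (String × Int))) (target_class : Option String) : Int × Int × Int :=
  match target_class with
  | some t =>
      let tp := pvCell confusion_matrix t t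
      let r := confusion_matrix.foldl (fun (p : Int × Int) kv =>
        if t ≠ kv.1 then (p.1 + pvCell confusion_matrix kv.1 t, p.2 + pvCell confusion_matrix t kv.1) else p)
        ((0 : Int), (0 : Int))
      (tp, r.1, r.2)
  | none =>
      confusion_matrix.foldl (fun (acc : Int × Int × Int) kv1 =>
        confusion_matrix.foldl (fun (acc : Int × Int × Int) kv2 =>
          if kv1.1 ≠ kv2.1 then
            (acc.1, acc.2.1 + pvCell confusion_matrix kv2.1 kv1.1, acc.2.2 + pvCell confusion_matrix kv1.1 kv2.1)
          else
            (acc.1 + pvCell confusion_matrix kv1.1 kv2.1, acc.2)) acc)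
        ((0 : Int), (0 : Int), (0 : Int))

-- ===== PORT B =====
def sum_tp_fp_fn_alt (confusion_matrix : List (String × List (String × Int))) (target_class : Option String) : Int × Int × Int :=
  match target_class with
  | some t =>
      let tp := pvCell confusion_matrix t t
      let fp := (confusion_matrix.map (fun kv => pvCell confusion_matrix kv.1 t)).sum - tp
      let fn := (confusion_matrix.map (fun kv => pvCell confusion_matrix t kv.1)).sum - tp
      (tp, fp, fn)
  | none =>
      let total := (confusion_matrix.map (fun kv1 =>
        (confusion_matrix.map (fun kv2 => pvCell confusion_matrix kv1.1 kv2.1)).sum)).sum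
      let diag := (confusion_matrix.map (fun kv => pvCell confusion_matrix kv.1 kv.1)).sum
      (diag, total - diag, total - diag)

-- ===== PRECONDITION & SPEC =====
-- Pre_ excludes (a) association lists with duplicate outer keys, which no Python dict can represent,
-- and (b) inputs where some accessed entry is missing, on which A raises KeyError.
def Pre_sum_tp_fp_fn (confusion_matrix : List (String × List (String × Int))) (target_class : Option String) : Prop :=
  (confusion_matrix.map Prod.fst).Nodup ∧
  match target_class with
  | some t =>
      t ∈ confusion_matrix.map Prod.fst ∧
      ∀ kv ∈ confusion_matrix,
        t ∈ (pvRow confusion_matrix kv.1).map Prod.fst ∧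
        kv.1 ∈ (pvRow confusion_matrix t).map Prod.fst
  | none =>
      ∀ kv1 ∈ confusion_matrix, ∀ kv2 ∈ confusion_matrix,
        kv2.1 ∈ (pvRow confusion_matrix kv1.1).map Prod.fst

instance (confusion_matrix : List (String × List (String × Int))) (target_class : Option String) : Decidable (Pre_sum_tp_fp_fn confusion_matrix target_class) := by
  unfold Pre_sum_tp_fp_fn; cases target_class <;> infer_instance

def pvWitness_sum_tp_fp_fn : (List (String × List (String × Int))) × Option String :=
  ([("a", [("a", 3), ("b", 1)]), ("b", [("a", 0), ("b", 2)])], some "a")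

def Spec_sum_tp_fp_fn (confusion_matrix : List (String × List (String × Int))) (target_class : Option String) (out : Int × Int × Int) : Prop := out = sum_tp_fp_fn_alt confusion_matrix target_class
instance (confusion_matrix : List (String × List (String × Int))) (target_class : Option String) (out : Int × Int × Int) : Decidable (Spec_sum_tp_fp_fn confusion_matrix target_class out) := by unfold Spec_sum_tp_fp_fn; infer_instance

-- ===== CLAIM (what is proved, stated in full; the proofs are below) =====
def Claim_equal_sum_tp_fp_fn : Prop := ∀ (confusion_matrix : List (String × List (String × Int))) (target_class : Option String), Dom_sum_tp_fp_fn confusion_matrix target_class → Pre_sum_tp_fp_fn confusion_matrix target_class → Spec_sum_tp_fp_fn confusion_matrix target_class (sum_tp_fp_fn confusion_matrix target_class)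

-- ===== LEMMAS AND PROOFS =====

theorem pvSumMapSub {α : Type} (L : List α) (f g : α → Int) :
    (L.map (fun x => f x - g x)).sum = (L.map f).sum - (L.map g).sum := by
  induction L with
  | nil => simp
  | cons a l ih => simp [ih]; ring

theorem pvSumSwap {α : Type} (L M : List α) (g : α → α → Int) :
    (L.map (fun x => (M.map (fun y => g x y)).sum)).sum
      = (M.map (fun y => (L.map (fun x => g x y)).sum)).sum := by
  induction L with
  | nil => simp
  | cons a l ih => simp [ih]

theorem pvSumIfEqZero {β : Type} (L : List (String × β)) (t : String) (f : String → Int)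
    (h : t ∉ L.map Prod.fst) :
    (L.map (fun kv => if t = kv.1 then f kv.1 else 0)).sum = 0 := by
  induction L with
  | nil => simp
  | cons a l ih =>
      simp only [List.map_cons, List.mem_cons] at h ⊢
      rw [List.sum_cons, if_neg (fun he => h (Or.inl he)), ih (fun hm => h (Or.inr hm))]
      simp

theorem pvSumIfEq {β : Type} (L : List (String × β)) (t : String) (f : String → Int)
    (hnd : (L.map Prod.fst).Nodup) (hm : t ∈ L.map Prod.fst) :
    (L.map (fun kv => if t = kv.1 then f kv.1 else 0)).sum = f t := by
  induction L with
  | nil => simp at hm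
  | cons a l ih =>
      simp only [List.map_cons, List.nodup_cons] at hnd
      simp only [List.map_cons, List.mem_cons] at hm
      by_cases he : t = a.1
      · rw [List.map_cons, List.sum_cons, if_pos he,
            pvSumIfEqZero l t f (by rw [he]; exact hnd.1), he]
        simp
      · rw [List.map_cons, List.sum_cons, if_neg he, ih hnd.2 (hm.resolve_left he)]
        simp

theorem pvSumIfNe {β : Type} (L : List (String × β)) (t : String) (f : String → Int)
    (hnd : (L.map Prod.fst).Nodup) (hm : t ∈ L.map Prod.fst) :
    (L.map (fun kv => if t ≠ kv.1 then f kv.1 else 0)).sum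
      = (L.map (fun kv => f kv.1)).sum - f t := by
  have hfun : (fun (kv : String × β) => if t ≠ kv.1 then f kv.1 else 0)
      = fun kv => f kv.1 - (if t = kv.1 then f kv.1 else 0) := by
    funext kv; by_cases h : t = kv.1 <;> simp [h]
  rw [hfun, pvSumMapSub, pvSumIfEq L t f hnd hm]

theorem pvFoldPair (L : List (String × List (String × Int))) (t : String) (f g : String → Int) :
    ∀ init : Int × Int,
      L.foldl (fun p kv => if t ≠ kv.1 then (p.1 + f kv.1, p.2 + g kv.1) else p) init
        = (init.1 + (L.map (fun kv => if t ≠ kv.1 then f kv.1 else 0)).sum,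
           init.2 + (L.map (fun kv => if t ≠ kv.1 then g kv.1 else 0)).sum) := by
  induction L with
  | nil => intro init; simp
  | cons a l ih =>
      intro init
      rw [List.foldl_cons]
      by_cases h : t = a.1
      · rw [if_neg (by simp [h]), ih]
        simp [h]
      · rw [if_pos h, ih]
        simp only [List.map_cons, List.sum_cons, if_pos h]
        exact Prod.ext (by ring) (by ring)

theorem pvFoldTriple {α : Type} (L : List α) (u v w : α → Int) :
    ∀ init : Int × Int × Int,
      L.foldl (fun acc x => (acc.1 + u x, acc.2.1 + v x, acc.2.2 + w x)) init
        = (init.1 + (L.map u).sum, init.2.1 + (L.map v).sum, init.2.2 + (L.map w).sum) := by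
  induction L with
  | nil => intro init; simp
  | cons a l ih =>
      intro init
      rw [List.foldl_cons, ih]
      simp only [List.map_cons, List.sum_cons]
      refine Prod.ext (by ring) (Prod.ext (by ring) (by ring))

theorem pvFoldInner (L : List (String × List (String × Int))) (k1 : String)
    (c a b : String → Int) :
    ∀ init : Int × Int × Int,
      L.foldl (fun acc kv2 => if k1 ≠ kv2.1
          then (acc.1, acc.2.1 + a kv2.1, acc.2.2 + b kv2.1)
          else (acc.1 + c kv2.1, acc.2)) init
        = (init.1 + (L.map (fun kv => if k1 = kv.1 then c kv.1 else 0)).sum,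
           init.2.1 + (L.map (fun kv => if k1 ≠ kv.1 then a kv.1 else 0)).sum,
           init.2.2 + (L.map (fun kv => if k1 ≠ kv.1 then b kv.1 else 0)).sum) := by
  induction L with
  | nil => intro init; simp
  | cons x l ih =>
      intro init
      rw [List.foldl_cons]
      by_cases h : k1 = x.1
      · rw [if_neg (by simp [h]), ih]
        simp only [List.map_cons, List.sum_cons, if_pos h, if_neg (by simp [h] : ¬ k1 ≠ x.1)]
        refine Prod.ext (by simp; ring) (Prod.ext (by simp) (by simp))
      · rw [if_pos h, ih]
        simp only [List.map_cons, List.sum_cons, if_neg h, if_pos h]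
        refine Prod.ext (by simp) (Prod.ext (by simp; ring) (by simp; ring))

theorem sum_tp_fp_fn_spec : Claim_equal_sum_tp_fp_fn := by
  intro cm tc _hdom hpre
  unfold Spec_sum_tp_fp_fn
  obtain ⟨hnd, hrest⟩ := hpre
  cases tc with
  | some t =>
      obtain ⟨hmem, _⟩ := hrest
      simp only [sum_tp_fp_fn, sum_tp_fp_fn_alt]
      rw [pvFoldPair cm t (fun k => pvCell cm k t) (fun k => pvCell cm t k)]
      rw [pvSumIfNe cm t (fun k => pvCell cm k t) hnd hmem,
          pvSumIfNe cm t (fun k => pvCell cm t k) hnd hmem]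
      refine Prod.ext rfl (Prod.ext (by simp) (by simp))
  | none =>
      simp only [sum_tp_fp_fn, sum_tp_fp_fn_alt]
      have hfun : (fun (acc : Int × Int × Int) (kv1 : String × List (String × Int)) =>
          cm.foldl (fun acc kv2 => if kv1.1 ≠ kv2.1
            then (acc.1, acc.2.1 + pvCell cm kv2.1 kv1.1, acc.2.2 + pvCell cm kv1.1 kv2.1)
            else (acc.1 + pvCell cm kv1.1 kv2.1, acc.2)) acc)
        = fun acc kv1 =>
          (acc.1 + (cm.map (fun kv => if kv1.1 = kv.1 then pvCell cm kv1.1 kv.1 else 0)).sum,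
           acc.2.1 + (cm.map (fun kv => if kv1.1 ≠ kv.1 then pvCell cm kv.1 kv1.1 else 0)).sum,
           acc.2.2 + (cm.map (fun kv => if kv1.1 ≠ kv.1 then pvCell cm kv1.1 kv.1 else 0)).sum) := by
        funext acc kv1
        rw [pvFoldInner cm kv1.1 (fun k => pvCell cm kv1.1 k)
              (fun k => pvCell cm k kv1.1) (fun k => pvCell cm kv1.1 k) acc]
      rw [hfun, pvFoldTriple]
      have hkey : ∀ kv1 ∈ cm, kv1.1 ∈ cm.map Prod.fst := by
        intro kv1 h; exact List.mem_map.mpr ⟨kv1, h, rfl⟩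
      have htp : (cm.map (fun kv1 =>
          (cm.map (fun kv => if kv1.1 = kv.1 then pvCell cm kv1.1 kv.1 else 0)).sum)).sum
          = (cm.map (fun kv => pvCell cm kv.1 kv.1)).sum := by
        refine congrArg List.sum (List.map_congr_left ?_)
        intro kv1 h1
        exact pvSumIfEq cm kv1.1 (fun k => pvCell cm kv1.1 k) hnd (hkey kv1 h1)
      have hfp : (cm.map (fun kv1 =>
          (cm.map (fun kv => if kv1.1 ≠ kv.1 then pvCell cm kv.1 kv1.1 else 0)).sum)).sum
          = (cm.map (fun kv1 => (cm.map (fun kv2 => pvCell cm kv1.1 kv2.1)).sum)).sum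
            - (cm.map (fun kv => pvCell cm kv.1 kv.1)).sum := by
        have h1 : (cm.map (fun kv1 =>
            (cm.map (fun kv => if kv1.1 ≠ kv.1 then pvCell cm kv.1 kv1.1 else 0)).sum)).sum
            = (cm.map (fun kv1 =>
                (cm.map (fun kv => pvCell cm kv.1 kv1.1)).sum - pvCell cm kv1.1 kv1.1)).sum := by
          refine congrArg List.sum (List.map_congr_left ?_)
          intro kv1 hm1
          exact pvSumIfNe cm kv1.1 (fun k => pvCell cm k kv1.1) hnd (hkey kv1 hm1)
        rw [h1, pvSumMapSub]
        rw [pvSumSwap cm cm (fun x y => pvCell cm y.1 x.1)]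
      have hfn : (cm.map (fun kv1 =>
          (cm.map (fun kv => if kv1.1 ≠ kv.1 then pvCell cm kv1.1 kv.1 else 0)).sum)).sum
          = (cm.map (fun kv1 => (cm.map (fun kv2 => pvCell cm kv1.1 kv2.1)).sum)).sum
            - (cm.map (fun kv => pvCell cm kv.1 kv.1)).sum := by
        have h1 : (cm.map (fun kv1 =>
            (cm.map (fun kv => if kv1.1 ≠ kv.1 then pvCell cm kv1.1 kv.1 else 0)).sum)).sum
            = (cm.map (fun kv1 =>
                (cm.map (fun kv => pvCell cm kv1.1 kv.1)).sum - pvCell cm kv1.1 kv1.1)).sum := by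
          refine congrArg List.sum (List.map_congr_left ?_)
          intro kv1 hm1
          exact pvSumIfNe cm kv1.1 (fun k => pvCell cm kv1.1 k) hnd (hkey kv1 hm1)
        rw [h1, pvSumMapSub]
      rw [htp, hfp, hfn]
      simp
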